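-- pv_equiv track=rewrite | github.com/SciGaP/epolyscat-django-app | epolyscat_django_app/tRecX/SCRIPTS/submit_tools.py | nextInLists
-- ===== SOURCE A (Python) =====
-- import copy
--
-- def nextInLists(inpars,lists):
--     """increment inpars by ranges in lists, create first if empty"""
--     if len(lists)==0:
--         return {}
--
--     if len(inpars)==0:
--         newpars={}
--         for l in lists:
--             newpars[l[0]]=l[1]
--         return newpars
--
--     newpars=copy.deepcopy(inpars)
--     indx=lists[0].index(inpars[lists[0][0]])+1
--     if indx<len(lists[0]):
--         # next in present list
--         newpar=lists[0][indx]
--     elif len(lists)>1: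
--         # this list exhausted, reset to first, try next
--         newpar=lists[0][1]
--         newpars=nextInLists(inpars,lists[1:])
--     else:
--         return {}
--     newpars[lists[0][0]]=newpar
--
--     if len(newpars)==len(inpars):
--         # update successful
--         return newpars
--     else:
--         return {}
-- ===== SOURCE B (Python) =====
-- import copy
--
-- def nextInLists(inpars, lists):
--     """increment inpars by ranges in lists, create first if empty"""
--     if len(lists) == 0:
--         return {}
--     if len(inpars) == 0:
--         return {l[0]: l[1] for l in lists}
--     newpars = copy.deepcopy(inpars)
--     for l in lists:
--         indx = l.index(inpars[l[0]]) + 1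
--         if indx < len(l):
--             # next value in this list: done
--             newpars[l[0]] = l[indx]
--             return newpars
--         # this list exhausted: reset to its first value and carry
--         newpars[l[0]] = l[1]
--     # every list exhausted
--     return {}
-- ===== Notes on version B (the rewrite author's own statement) =====
-- stated objective: simpler
-- what changed: A's recursion over list suffixes (reset applied on the way out of each call plus a length re-check after every reassignment) is replaced by a single iterative odometer loop that carries the updated dict forward and returns at the first incrementable list.
-- outside the precondition, e.g. on nextInLists({'k': 'b'}, [['k', 'a', 'b'], ['k', 'a', 'b']]): A returns {'k': 'a'}, B returns {}
import Mathlib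
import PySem

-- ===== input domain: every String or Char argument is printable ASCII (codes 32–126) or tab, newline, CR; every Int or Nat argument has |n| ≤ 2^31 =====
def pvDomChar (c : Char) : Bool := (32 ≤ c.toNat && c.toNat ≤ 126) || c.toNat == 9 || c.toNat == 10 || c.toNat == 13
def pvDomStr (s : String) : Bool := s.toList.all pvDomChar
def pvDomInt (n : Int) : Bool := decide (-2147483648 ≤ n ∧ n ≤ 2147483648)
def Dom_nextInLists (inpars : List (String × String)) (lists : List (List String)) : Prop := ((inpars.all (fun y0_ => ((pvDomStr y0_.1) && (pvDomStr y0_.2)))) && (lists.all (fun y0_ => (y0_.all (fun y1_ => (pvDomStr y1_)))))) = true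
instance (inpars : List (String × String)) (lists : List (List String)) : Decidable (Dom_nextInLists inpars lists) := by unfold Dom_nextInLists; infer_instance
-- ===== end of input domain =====

-- B replaces A's recursion over list suffixes (reset applied on the way out of each call,
-- plus a length re-check after every reassignment) by a single iterative odometer loop that
-- carries an accumulator forward; objective: simpler.  Dicts are assoc lists; deepcopy of an
-- immutable assoc list is the list itself.

-- ===== PORT A =====
-- recursive body of A, working on the dict (the Python function is dict -> dict)
def nextInListsA (inpars : PySem.Dict String String) (lists : List (List String)) :
    PySem.Dict String String :=
  match lists with
  | [] => PySem.Dict.empty                                   -- len(lists)==0: return {}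
  | l0 :: rest =>
    if inpars.size = 0 then                                  -- len(inpars)==0: build first combination
      (l0 :: rest).foldl (fun np l => np.insert (l.getD 0 "") (l.getD 1 "")) PySem.Dict.empty
    else
      -- newpars = deepcopy(inpars) is inpars itself (immutable assoc list)
      let name := l0.getD 0 ""                               -- lists[0][0]  (Pre_: l0 nonempty)
      let indx := ((PySem.List.index? l0 (inpars.getD name "")).getD 0) + 1
        -- lists[0].index(inpars[lists[0][0]]) + 1  (Pre_: key present, value present)
      if indx < l0.length then
        let newpars := inpars.insert name (l0.getD indx "")  -- newpars[lists[0][0]] = newpar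
        if newpars.size = inpars.size then newpars else PySem.Dict.empty
      else if rest ≠ [] then                                 -- len(lists) > 1
        let newpars := (nextInListsA inpars rest).insert name (l0.getD 1 "")
        if newpars.size = inpars.size then newpars else PySem.Dict.empty
      else PySem.Dict.empty                                  -- return {}

def nextInLists (inpars : List (String × String)) (lists : List (List String)) :
    List (String × String) :=
  (nextInListsA (PySem.Dict.ofList inpars) lists).items

-- ===== PORT B =====
-- B's for-loop over lists, carrying the updated dict `newpars` forward
def nextInListsBGo (inpars : PySem.Dict String String) :
    List (List String) → PySem.Dict String String → PySem.Dict String String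
  | [], _ => PySem.Dict.empty                                -- loop ended: every list exhausted
  | l :: ls, newpars =>
    let indx := ((PySem.List.index? l (inpars.getD (l.getD 0 "") "")).getD 0) + 1
    if indx < l.length then
      newpars.insert (l.getD 0 "") (l.getD indx "")          -- increment: return newpars
    else
      nextInListsBGo inpars ls (newpars.insert (l.getD 0 "") (l.getD 1 ""))  -- reset, carry

def nextInLists_alt (inpars : List (String × String)) (lists : List (List String)) :
    List (String × String) :=
  if lists.length = 0 then []
  else if (PySem.Dict.ofList inpars).size = 0 then
    -- {l[0]: l[1] for l in lists}
    (lists.foldl (fun np l => np.insert (l.getD 0 "") (l.getD 1 "")) PySem.Dict.empty).items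
  else
    (nextInListsBGo (PySem.Dict.ofList inpars) lists (PySem.Dict.ofList inpars)).items

-- ===== PRECONDITION & SPEC =====
-- helper predicates the precondition is phrased with (no port is referenced):
-- pvInc: the list's current value is followed by another value (the branch test both
-- programs make); pvOk: the list is well-formed w.r.t. the dict (2 entries, its name is a
-- key, the current value occurs); pvPrefixOk: every list up to and including the first
-- incrementable one is well-formed (the part of `lists` the programs actually inspect).
def pvInc (d : PySem.Dict String String) (l : List String) : Prop :=
  ((PySem.List.index? l (d.getD (l.getD 0 "") "")).getD 0) + 1 < l.length
def pvOk (d : PySem.Dict String String) (l : List String) : Prop :=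
  2 ≤ l.length ∧ d.contains (l.getD 0 "") = true ∧ d.getD (l.getD 0 "") "" ∈ l
def pvExh (d : PySem.Dict String String) (l : List String) : Prop := pvOk d l ∧ ¬ pvInc d l
def pvPrefixOk (d : PySem.Dict String String) (L : List (List String)) : Prop :=
  ∀ i, (h : i < L.length) → (∀ j, (hj : j < i) → pvExh d (L[j]'(lt_trans hj h))) → pvOk d L[i]
-- pvPrefixNodup: a traversed list's name never repeats an earlier (traversed) list's name
def pvPrefixNodup (d : PySem.Dict String String) (L : List (List String)) : Prop :=
  ∀ j, (hj : j < L.length) → (∀ m, (hm : m < j) → pvExh d (L[m]'(lt_trans hm hj))) →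
    ∀ m, (hm : m < j) → (L[m]'(lt_trans hm hj)).getD 0 "" ≠ L[j].getD 0 ""

-- Pre_ excludes (a) inputs where Python A raises: a malformed list (fewer than 2 entries, a
-- name that is not a key of inpars, or a current value absent from the list) inside the
-- inspected prefix, or anywhere when inpars is empty; and (b) duplicate parameter names
-- inside the inspected prefix, on which A's recursive reset/length-check behaviour is
-- accidental (the same dict key is reassigned twice, in opposite orders in A and B).
def Pre_nextInLists (inpars : List (String × String)) (lists : List (List String)) : Prop :=
  (inpars ≠ [] → pvPrefixNodup (PySem.Dict.ofList inpars) lists) ∧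
  (inpars = [] → ∀ l ∈ lists, 2 ≤ l.length) ∧
  (inpars ≠ [] → pvPrefixOk (PySem.Dict.ofList inpars) lists)
instance (inpars : List (String × String)) (lists : List (List String)) :
    Decidable (Pre_nextInLists inpars lists) := by
  unfold Pre_nextInLists pvPrefixNodup pvPrefixOk pvExh pvOk pvInc; infer_instance

def pvWitness_nextInLists : (List (String × String)) × List (List String) :=
  ([("a", "x"), ("b", "z")], [["a", "x", "y"], ["b", "z"]])

def Spec_nextInLists (inpars : List (String × String)) (lists : List (List String)) (out : List (String × String)) : Prop := out = nextInLists_alt inpars lists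
instance (inpars : List (String × String)) (lists : List (List String)) (out : List (String × String)) : Decidable (Spec_nextInLists inpars lists out) := by unfold Spec_nextInLists; infer_instance

-- ===== CLAIM (what is proved, stated in full; the proofs are below) =====
def Claim_equal_nextInLists : Prop := ∀ (inpars : List (String × String)) (lists : List (List String)), Dom_nextInLists inpars lists → Pre_nextInLists inpars lists → Spec_nextInLists inpars lists (nextInLists inpars lists)

-- ===== LEMMAS AND PROOFS =====

theorem pv_insert_comm (d : PySem.Dict String String) (k1 k2 : String) (v1 v2 : String)
    (hne : k1 ≠ k2) (h1 : d.contains k1 = true) :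
    (d.insert k1 v1).insert k2 v2 = (d.insert k2 v2).insert k1 v1 := by
  have hc1 : (d.insert k2 v2).contains k1 = true := by
    rw [PySem.Dict.contains_insert]; simp [h1]
  by_cases h2 : d.contains k2 = true
  · have hc2 : (d.insert k1 v1).contains k2 = true := by
      rw [PySem.Dict.contains_insert]; simp [h2]
    apply PySem.Dict.ext
    rw [PySem.Dict.items_insert_of_contains _ _ hc2,
        PySem.Dict.items_insert_of_contains _ _ h1,
        PySem.Dict.items_insert_of_contains _ _ hc1,
        PySem.Dict.items_insert_of_contains _ _ h2,
        List.map_map, List.map_map]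
    apply List.map_congr_left
    intro p _
    by_cases e1 : p.1 = k1 <;> by_cases e2 : p.1 = k2 <;>
      simp [Function.comp, e1, e2, hne, Ne.symm hne]
  · have h2' : d.contains k2 = false := by simpa using h2
    have hc2 : (d.insert k1 v1).contains k2 = false := by
      rw [PySem.Dict.contains_insert]; simp [h2', Ne.symm hne]
    apply PySem.Dict.ext
    rw [PySem.Dict.items_insert_of_contains _ _ hc1,
        PySem.Dict.items_insert_of_not_contains _ _ hc2,
        PySem.Dict.items_insert_of_contains _ _ h1,
        PySem.Dict.items_insert_of_not_contains _ _ h2',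
        List.map_append]
    simp [Ne.symm hne]

theorem pv_go_empty (d : PySem.Dict String String) (L : List (List String))
    (acc : PySem.Dict String String) (hinc : ∀ l ∈ L, ¬ pvInc d l) :
    nextInListsBGo d L acc = PySem.Dict.empty := by
  induction L generalizing acc with
  | nil => rfl
  | cons l ls ih =>
    have hl := hinc l (by simp)
    rw [nextInListsBGo]
    simp only [pvInc] at hl
    rw [if_neg hl]
    exact ih _ (fun x hx => hinc x (by simp [hx]))

theorem pv_go_insert (d : PySem.Dict String String) (L : List (List String))
    (acc : PySem.Dict String String) (k v : String)
    (hk : acc.contains k = true)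
    (hnk : ∀ j, (hj : j < L.length) →
      (∀ m, (hm : m < j) → pvExh d (L[m]'(lt_trans hm hj))) → k ≠ L[j].getD 0 "")
    (hpre : pvPrefixOk d L)
    (hinc : ∃ l ∈ L, pvInc d l) :
    nextInListsBGo d L (acc.insert k v) = (nextInListsBGo d L acc).insert k v := by
  induction L generalizing acc with
  | nil => simp at hinc
  | cons l1 rs ih =>
    have hok1 : pvOk d l1 := hpre 0 (by simp) (fun j hj => absurd hj (by omega))
    have hkl : k ≠ l1.getD 0 "" := by
      simpa using hnk 0 (by simp) (fun m hm => absurd hm (by omega))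
    rw [nextInListsBGo, nextInListsBGo]
    by_cases hl : pvInc d l1
    · simp only [pvInc] at hl
      rw [if_pos hl, if_pos hl]
      exact pv_insert_comm acc k _ v _ hkl hk
    · have hexh1 : pvExh d l1 := ⟨hok1, hl⟩
      simp only [pvInc] at hl
      rw [if_neg hl, if_neg hl]
      rw [pv_insert_comm acc k _ v _ hkl hk]
      apply ih
      · rw [PySem.Dict.contains_insert]; simp [hk]
      · intro j hj hp
        have := hnk (j + 1) (by simpa using Nat.succ_lt_succ hj)
          (fun m hm => by
            cases m with
            | zero => simpa using hexh1
            | succ m => simpa using hp m (by omega))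
        simpa using this
      · intro i h hp
        have := hpre (i + 1) (by simpa using Nat.succ_lt_succ h)
          (fun m hm => by
            cases m with
            | zero => simpa using hexh1
            | succ m => simpa using hp m (by omega))
        simpa using this
      · rcases hinc with ⟨x, hx, hix⟩
        rcases List.mem_cons.mp hx with h | h
        · exact absurd (h ▸ hix) hl
        · exact ⟨x, h, hix⟩

theorem pv_nodup_shift (d : PySem.Dict String String) (l1 : List String)
    (rs : List (List String)) (h : pvPrefixNodup d (l1 :: rs)) (hexh : pvExh d l1) :
    pvPrefixNodup d rs := by
  intro j hj hp m hm
  have := h (j + 1) (by simpa using Nat.succ_lt_succ hj)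
    (fun m' hm' => by
      cases m' with
      | zero => simpa using hexh
      | succ m' => simpa using hp m' (by omega))
    (m + 1) (by omega)
  simpa using this

theorem pv_prefix_shift (d : PySem.Dict String String) (l1 : List String)
    (rs : List (List String)) (hpre : pvPrefixOk d (l1 :: rs)) (hexh : pvExh d l1) :
    pvPrefixOk d rs := by
  intro i h hp
  have := hpre (i + 1) (by simpa using Nat.succ_lt_succ h)
    (fun j hj => by
      cases j with
      | zero => simpa using hexh
      | succ j => simpa using hp j (by omega))
  simpa using this

theorem pv_go_keys (d : PySem.Dict String String) (L : List (List String))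
    (acc : PySem.Dict String String) (hkeys : acc.keys = d.keys)
    (hpre : pvPrefixOk d L) (hinc : ∃ l ∈ L, pvInc d l) :
    (nextInListsBGo d L acc).keys = acc.keys := by
  induction L generalizing acc with
  | nil => simp at hinc
  | cons l1 rs ih =>
    have hok1 : pvOk d l1 := hpre 0 (by simp) (fun j hj => absurd hj (by omega))
    have hca : acc.contains (l1.getD 0 "") = true := by
      rw [PySem.Dict.contains_iff_mem_keys, hkeys]
      exact (PySem.Dict.contains_iff_mem_keys d _).mp hok1.2.1
    rw [nextInListsBGo]
    by_cases hl : pvInc d l1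
    · simp only [pvInc] at hl
      rw [if_pos hl]
      exact PySem.Dict.keys_insert_of_contains _ _ hca
    · have hl' := hl
      simp only [pvInc] at hl'
      rw [if_neg hl']
      have hkeys' : (acc.insert (l1.getD 0 "") (l1.getD 1 "")).keys = acc.keys :=
        PySem.Dict.keys_insert_of_contains _ _ hca
      rw [ih _ (hkeys'.trans hkeys) (pv_prefix_shift d l1 rs hpre ⟨hok1, hl⟩) ?_, hkeys']
      rcases hinc with ⟨x, hx, hix⟩
      rcases List.mem_cons.mp hx with h | h
      · exact absurd (h ▸ hix) hl
      · exact ⟨x, h, hix⟩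

theorem pv_size_keys (d : PySem.Dict String String) : d.size = d.keys.length := by
  simp [PySem.Dict.size, PySem.Dict.keys]

theorem pv_main (d : PySem.Dict String String) (L : List (List String))
    (hne : ¬ d.size = 0)
    (hpn : pvPrefixNodup d L)
    (hpre : pvPrefixOk d L) :
    nextInListsA d L = nextInListsBGo d L d := by
  induction L with
  | nil => rfl
  | cons l0 rest ih =>
    rw [nextInListsA, nextInListsBGo]
    rw [if_neg hne]
    simp only []
    have hok0 : pvOk d l0 := hpre 0 (by simp) (fun j hj => absurd hj (by omega))
    have hc0 : d.contains (l0.getD 0 "") = true := hok0.2.1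
    by_cases hinc0 : pvInc d l0
    · simp only [pvInc] at hinc0
      rw [if_pos hinc0, if_pos hinc0]
      rw [PySem.Dict.size_insert, if_pos hc0, if_pos rfl]
    · have hexh0 : pvExh d l0 := ⟨hok0, hinc0⟩
      simp only [pvInc] at hinc0
      rw [if_neg hinc0, if_neg hinc0]
      cases rest with
      | nil => rw [if_neg (by simp)]; rfl
      | cons l1 rs =>
        rw [if_pos (by simp)]
        have hnk : ∀ j, (hj : j < (l1 :: rs).length) →
            (∀ m, (hm : m < j) → pvExh d ((l1 :: rs)[m]'(lt_trans hm hj))) →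
            l0.getD 0 "" ≠ (l1 :: rs)[j].getD 0 "" := by
          intro j hj hp
          have := hpn (j + 1) (by simpa using Nat.succ_lt_succ hj)
            (fun m hm => by
              cases m with
              | zero => simpa using hexh0
              | succ m => simpa using hp m (by omega))
            0 (by omega)
          simpa using this
        have hprer : pvPrefixOk d (l1 :: rs) := pv_prefix_shift d l0 _ hpre hexh0
        have ihr : nextInListsA d (l1 :: rs) = nextInListsBGo d (l1 :: rs) d :=
          ih (pv_nodup_shift d l0 _ hpn hexh0) hprer
        by_cases hinc : ∃ l ∈ l1 :: rs, pvInc d l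
        · rw [ihr]
          have hkeys := pv_go_keys d (l1 :: rs) d rfl hprer hinc
          have hcr : (nextInListsBGo d (l1 :: rs) d).contains (l0.getD 0 "") = true := by
            rw [PySem.Dict.contains_iff_mem_keys, hkeys]
            exact (PySem.Dict.contains_iff_mem_keys d _).mp hc0
          have hsz : (nextInListsBGo d (l1 :: rs) d).size = d.size := by
            rw [pv_size_keys, pv_size_keys, hkeys]
          rw [PySem.Dict.size_insert, if_pos hcr, hsz, if_pos rfl]
          exact (pv_go_insert d (l1 :: rs) d _ _ hc0 hnk hprer hinc).symm
        · have hinc' : ∀ l ∈ l1 :: rs, ¬ pvInc d l := fun x hx hpx => hinc ⟨x, hx, hpx⟩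
          rw [ihr, pv_go_empty d (l1 :: rs) d hinc', pv_go_empty d (l1 :: rs) _ hinc']
          have h2 : 2 ≤ d.size := by
            have hok1 : pvOk d l1 := hprer 0 (by simp) (fun j hj => absurd hj (by omega))
            have hm0 : l0.getD 0 "" ∈ d.keys := (PySem.Dict.contains_iff_mem_keys d _).mp hc0
            have hm1 : l1.getD 0 "" ∈ d.keys := (PySem.Dict.contains_iff_mem_keys d _).mp hok1.2.1
            have hne01 : l0.getD 0 "" ≠ l1.getD 0 "" :=
              hnk 0 (by simp) (fun m hm => absurd hm (by omega))
            rw [pv_size_keys]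
            have hsub2 : ({l0.getD 0 "", l1.getD 0 ""} : Finset String) ⊆ d.keys.toFinset := by
              intro x hx
              rcases Finset.mem_insert.mp hx with h | h
              · exact List.mem_toFinset.mpr (h ▸ hm0)
              · exact List.mem_toFinset.mpr ((Finset.mem_singleton.mp h) ▸ hm1)
            have hcard := Finset.card_le_card hsub2
            rw [Finset.card_pair hne01] at hcard
            exact hcard.trans d.keys.toFinset_card_le
          rw [if_neg (by
            rw [PySem.Dict.size_insert, if_neg (by simp [PySem.Dict.contains_empty])]
            simp only [PySem.Dict.size_empty]
            omega)]

-- ===== VERDICT (by name: the statement is the Claim_ definition above) =====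
theorem nextInLists_spec : Claim_equal_nextInLists := by
  intro inpars lists _ hpre
  unfold Spec_nextInLists
  obtain ⟨hh, _hemp, hpfx⟩ := hpre
  cases lists with
  | nil => rfl
  | cons l0 rest =>
    unfold nextInLists nextInLists_alt
    by_cases hz : (PySem.Dict.ofList inpars).size = 0
    · rw [nextInListsA, if_pos hz, if_neg (by simp), if_pos hz]
    · have hi : inpars ≠ [] := by intro he; subst he; exact hz rfl
      rw [if_neg (by simp), if_neg hz]
      exact congrArg PySem.Dict.items (pv_main _ _ hz (hh hi) (hpfx hi))
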